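-- pv_equiv track=rewrite | github.com/lewinskydmitry/MIPT-Algorithms | week 6/problem 2/circular_shift.py | func
-- ===== SOURCE A (Python) =====
-- def circ_shift(s, k):
--     return s[k:] + s[:k]
--
-- def func(s1, s2):
--     if len(s1) != len(s2) or len(s1) < 2:
--         return -1
--
--     s = s1 + s2
--     d = [0] * (len(s) + 1)
--     for i in range(2, len(d)):
--         d[i] = d[i - 1]
--         while s[i - 1] != s[d[i]] and d[i] > 0:
--             d[i] = d[d[i]]
--         if s[i - 1] == s[d[i]]:
--             d[i] += 1
--
--     if circ_shift(s1, d[-1]) == s2: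
--         return len(s1) - d[-1]
--
--     return -1
-- ===== SOURCE B (Python) =====
-- def circ_shift(s, k):
--     return s[k:] + s[:k]
--
-- def func(s1, s2):
--     n = len(s1)
--     if n != len(s2) or n < 2:
--         return -1
--     s = s1 + s2
--     m = 2 * n
--     L = 0
--     for k in range(m - 1, 0, -1):
--         if s[k - 1] == s[-1] and s[:k] == s[m - k:]:
--             L = k
--             break
--     if circ_shift(s1, L) == s2:
--         return n - L
--     return -1
-- ===== Notes on version B (the rewrite author's own statement) =====
-- stated objective: simpler
-- what changed: Replaces the KMP prefix-function loop over s1+s2 with a direct descending scan that returns the first k (from 2n-1 down) whose length-k prefix equals its length-k suffix (the longest proper border), keeping the length guards and the final rotation check unchanged.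
import Mathlib
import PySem

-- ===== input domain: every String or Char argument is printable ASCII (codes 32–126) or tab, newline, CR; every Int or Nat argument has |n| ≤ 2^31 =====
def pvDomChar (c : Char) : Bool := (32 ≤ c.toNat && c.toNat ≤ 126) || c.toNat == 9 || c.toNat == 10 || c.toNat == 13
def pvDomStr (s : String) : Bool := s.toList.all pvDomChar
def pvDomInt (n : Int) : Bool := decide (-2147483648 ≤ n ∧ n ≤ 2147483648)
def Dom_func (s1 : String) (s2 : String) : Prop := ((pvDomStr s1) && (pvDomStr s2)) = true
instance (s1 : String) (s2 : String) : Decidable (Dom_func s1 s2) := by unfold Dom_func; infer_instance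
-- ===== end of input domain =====

-- B replaces A's KMP prefix-function computation of the longest border of s1+s2 by a direct
-- descending first-match scan (simpler, not faster); guards and the final rotation check are kept.

-- ===== PORT A =====
-- the `while s[i-1] != s[d[i]] and d[i] > 0: d[i] = d[d[i]]` loop; the chain value strictly
-- decreases (d[j] < j for j ≥ 1), so fuel v+1 is enough and the port is exact.
def kmpResolve (s : List Char) (c : Char) (d : List Nat) : Nat → Nat → Nat
  | 0, v => v
  | fuel+1, v => if c ≠ s.getD v ' ' ∧ 0 < v then kmpResolve s c d fuel (d.getD v 0) else v

-- one iteration of `for i in range(2, len(d))`; all indices are in range, so getD is exact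
def kmpStep (s : List Char) (d : List Nat) (i : Nat) : List Nat :=
  let c := s.getD (i-1) ' '
  let v0 := d.getD (i-1) 0
  let v := kmpResolve s c d (v0+1) v0
  d.set i (if c = s.getD v ' ' then v+1 else v)

-- circ_shift(s1, k) for 0 ≤ k is s1[k:]+s1[:k]; drop/take clamp exactly like Python slices here
def func (s1 : String) (s2 : String) : Int :=
  if s1.toList.length ≠ s2.toList.length ∨ s1.toList.length < 2 then -1
  else
    let s := s1.toList ++ s2.toList
    let d0 := List.replicate (s.length + 1) 0
    let d := (List.range' 2 (s.length - 1)).foldl (kmpStep s) d0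
    let L := d.getD s.length 0
    if s1.toList.drop L ++ s1.toList.take L = s2.toList then (s1.toList.length : Int) - L else -1

-- ===== PORT B =====
-- `for k in range(m-1, 0, -1): if s[k-1] == s[-1] and s[:k] == s[m-k:]: L = k; break` (else L = 0)
def findBorder (s : List Char) : Nat → Nat
  | 0 => 0
  | k+1 =>
    if s.getD k ' ' = s.getD (s.length - 1) ' ' ∧ s.take (k+1) = s.drop (s.length - (k+1))
    then k+1 else findBorder s k

def func_alt (s1 : String) (s2 : String) : Int :=
  let n := s1.toList.length
  if n ≠ s2.toList.length ∨ n < 2 then -1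
  else
    let s := s1.toList ++ s2.toList
    let m := 2 * n
    let L := findBorder s (m - 1)
    if s1.toList.drop L ++ s1.toList.take L = s2.toList then (n : Int) - L else -1

-- ===== PRECONDITION & SPEC =====
def Spec_func (s1 : String) (s2 : String) (out : Int) : Prop := out = func_alt s1 s2
instance (s1 : String) (s2 : String) (out : Int) : Decidable (Spec_func s1 s2 out) := by unfold Spec_func; infer_instance

-- ===== CLAIM (what is proved, stated in full; the proofs are below) =====
def Claim_equal_func : Prop := ∀ (s1 : String) (s2 : String), Dom_func s1 s2 → Spec_func s1 s2 (func s1 s2)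

-- ===== LEMMAS AND PROOFS =====

-- `brdb s j b`: the length-b prefix of s equals the length-b suffix of the length-j prefix of s
def brdb (s : List Char) (j b : Nat) : Bool :=
  decide (b ≤ j) && (List.range b).all (fun t => s.getD t ' ' == s.getD (j - b + t) ' ')

theorem brdb_iff (s : List Char) (j b : Nat) :
    brdb s j b = true ↔ (b ≤ j ∧ ∀ t, t < b → s.getD t ' ' = s.getD (j - b + t) ' ') := by
  simp [brdb]

-- longest proper border of the length-j prefix of s
def Bspec (s : List Char) (j : Nat) : Nat :=
  Nat.findGreatest (fun b => brdb s j b = true) (j - 1)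

theorem Bspec_border (s : List Char) (j : Nat) : brdb s j (Bspec s j) = true := by
  have h0 : (fun b => brdb s j b = true) 0 := by simp [brdb]
  unfold Bspec
  exact Nat.findGreatest_spec (P := fun b => brdb s j b = true) (Nat.zero_le _) h0

theorem Bspec_le (s : List Char) (j : Nat) : Bspec s j ≤ j - 1 :=
  Nat.findGreatest_le _

theorem le_Bspec (s : List Char) (j b : Nat) (hb : b ≤ j - 1) (h : brdb s j b = true) :
    b ≤ Bspec s j := by
  unfold Bspec
  exact Nat.le_findGreatest (P := fun b => brdb s j b = true) hb h

theorem brdb_trans (s : List Char) (j b2 b1 : Nat)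
    (h2 : brdb s j b2 = true) (h1 : brdb s b2 b1 = true) : brdb s j b1 = true := by
  rw [brdb_iff] at *
  obtain ⟨hle2, hx2⟩ := h2
  obtain ⟨hle1, hx1⟩ := h1
  refine ⟨le_trans hle1 hle2, fun t ht => ?_⟩
  rw [hx1 t ht, hx2 (b2 - b1 + t) (by omega)]
  congr 1
  omega

theorem brdb_shrink (s : List Char) (j b2 b1 : Nat)
    (h2 : brdb s j b2 = true) (h1 : brdb s j b1 = true) (hle : b1 ≤ b2) :
    brdb s b2 b1 = true := by
  rw [brdb_iff] at *
  obtain ⟨hle2, hx2⟩ := h2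
  obtain ⟨hle1, hx1⟩ := h1
  refine ⟨hle, fun t ht => ?_⟩
  rw [hx1 t ht, hx2 (b2 - b1 + t) (by omega)]
  congr 1
  omega

theorem brdb_succ_iff (s : List Char) (j b : Nat) :
    brdb s (j+1) (b+1) = true ↔
      (brdb s j b = true ∧ s.getD b ' ' = s.getD j ' ') := by
  simp only [brdb_iff]
  constructor
  · rintro ⟨hle, hx⟩
    refine ⟨⟨by omega, fun t ht => ?_⟩, ?_⟩
    · have := hx t (by omega)
      rwa [show j + 1 - (b + 1) + t = j - b + t by omega] at this
    · have := hx b (by omega)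
      rwa [show j + 1 - (b + 1) + b = j by omega] at this
  · rintro ⟨⟨hle, hx⟩, hb⟩
    refine ⟨by omega, fun t ht => ?_⟩
    rcases Nat.lt_or_ge t b with h | h
    · rw [hx t h]
      congr 1
      omega
    · have : t = b := by omega
      subst this
      rw [hb]
      congr 1
      omega

theorem resolve_correct (s : List Char) (c : Char) (d : List Nat) (i : Nat)
    (hd : ∀ j, j < i → d.getD j 0 = Bspec s j) :
    ∀ v fuel, v < fuel → v + 1 < i → brdb s (i-1) v = true →
      (brdb s (i-1) (kmpResolve s c d fuel v) = true ∧
       kmpResolve s c d fuel v ≤ v ∧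
       (c = s.getD (kmpResolve s c d fuel v) ' ' ∨ kmpResolve s c d fuel v = 0) ∧
       (∀ b, b ≤ v → brdb s (i-1) b = true → c = s.getD b ' ' → b ≤ kmpResolve s c d fuel v)) := by
  intro v
  induction v using Nat.strong_induction_on with
  | _ v IH =>
    intro fuel hfuel hvi hbv
    cases fuel with
    | zero => omega
    | succ f =>
      have heq : kmpResolve s c d (f+1) v =
          if c ≠ s.getD v ' ' ∧ 0 < v then kmpResolve s c d f (d.getD v 0) else v := rfl
      rw [heq]
      by_cases hc : c ≠ s.getD v ' ' ∧ 0 < v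
      · rw [if_pos hc]
        have hu : d.getD v 0 = Bspec s v := hd v (by omega)
        have hub : brdb s v (Bspec s v) = true := Bspec_border s v
        have hule : Bspec s v ≤ v - 1 := Bspec_le s v
        have huv : Bspec s v < v := by omega
        have hbu : brdb s (i-1) (Bspec s v) = true := brdb_trans s (i-1) v _ hbv hub
        rw [hu]
        obtain ⟨hw1, hw2, hw3, hw4⟩ := IH (Bspec s v) huv f (by omega) (by omega) hbu
        refine ⟨hw1, by omega, hw3, fun b hb hbb hcb => ?_⟩
        have hbne : b ≠ v := by
          intro h
          subst h
          exact hc.1 hcb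
        have hbsv : brdb s v b = true := brdb_shrink s (i-1) v b hbv hbb hb
        have : b ≤ Bspec s v := le_Bspec s v b (by omega) hbsv
        exact hw4 b this hbb hcb
      · rw [if_neg hc]
        refine ⟨hbv, le_refl v, ?_, fun b hb _ _ => hb⟩
        by_cases h0 : c = s.getD v ' '
        · exact Or.inl h0
        · right
          by_contra hv0
          exact hc ⟨h0, by omega⟩

theorem step_correct (s : List Char) (d : List Nat) (i : Nat)
    (h2 : 2 ≤ i) (hi : i ≤ s.length) (hlen : d.length = s.length + 1)
    (hd : ∀ j, j < i → d.getD j 0 = Bspec s j) :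
    (kmpStep s d i).length = s.length + 1 ∧
    (∀ j, j < i + 1 → (kmpStep s d i).getD j 0 = Bspec s j) := by
  refine ⟨by simp [kmpStep, hlen], ?_⟩
  intro j hj
  unfold kmpStep
  by_cases hji : j = i
  · subst hji
    have hget : ∀ x : Nat, (d.set j x).getD j 0 = x := by
      intro x
      have hjlen : j < d.length := by omega
      simp [List.getD, List.getElem?_set_self hjlen]
    rw [hget]
    have hv0 : d.getD (j-1) 0 = Bspec s (j-1) := hd (j-1) (by omega)
    rw [hv0]
    have hb0 : brdb s (j-1) (Bspec s (j-1)) = true := Bspec_border s (j-1)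
    have hv0le : Bspec s (j-1) ≤ j - 2 := by
      have := Bspec_le s (j-1)
      omega
    obtain ⟨hw1, hw2, hw3, hw4⟩ :=
      resolve_correct s (s.getD (j-1) ' ') d j hd (Bspec s (j-1)) (Bspec s (j-1) + 1)
        (by omega) (by omega) (by rwa [show j - 1 = j - 1 by rfl])
    set w := kmpResolve s (s.getD (j-1) ' ') d (Bspec s (j-1) + 1) (Bspec s (j-1)) with hw
    by_cases hcw : s.getD (j-1) ' ' = s.getD w ' '
    · rw [if_pos hcw]
      have hbw1 : brdb s j (w+1) = true := by
        have := (brdb_succ_iff s (j-1) w).mpr ⟨hw1, hcw.symm⟩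
        rwa [show j - 1 + 1 = j by omega] at this
      apply le_antisymm
      · exact le_Bspec s j (w+1) (by omega) hbw1
      · by_contra hcon
        have hgle : Bspec s j ≤ j - 1 := Bspec_le s j
        obtain ⟨g', hg'⟩ : ∃ g', Bspec s j = g' + 1 := ⟨Bspec s j - 1, by omega⟩
        have hbg : brdb s (j-1) g' = true ∧ s.getD g' ' ' = s.getD (j-1) ' ' := by
          have := Bspec_border s j
          rw [hg'] at this
          have h2 := (brdb_succ_iff s (j-1) g').mp (by rwa [show j - 1 + 1 = j by omega])
          exact h2
        have hgv0 : g' ≤ Bspec s (j-1) := le_Bspec s (j-1) g' (by omega) hbg.1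
        have : g' ≤ w := hw4 g' hgv0 hbg.1 hbg.2.symm
        omega
    · rw [if_neg hcw]
      have hw0 : w = 0 := by
        rcases hw3 with h | h
        · exact absurd h hcw
        · exact h
      rw [hw0]
      by_contra hcon
      have hgle : Bspec s j ≤ j - 1 := Bspec_le s j
      obtain ⟨g', hg'⟩ : ∃ g', Bspec s j = g' + 1 := ⟨Bspec s j - 1, by omega⟩
      have hbg : brdb s (j-1) g' = true ∧ s.getD g' ' ' = s.getD (j-1) ' ' := by
        have := Bspec_border s j
        rw [hg'] at this
        exact (brdb_succ_iff s (j-1) g').mp (by rwa [show j - 1 + 1 = j by omega])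
      have hgv0 : g' ≤ Bspec s (j-1) := le_Bspec s (j-1) g' (by omega) hbg.1
      have hg'w : g' ≤ w := hw4 g' hgv0 hbg.1 hbg.2.symm
      have : g' = 0 := by omega
      subst this
      apply hcw
      rw [hw0]
      exact hbg.2.symm
  · have hne : ∀ x : Nat, (d.set i x).getD j 0 = d.getD j 0 := by
      intro x
      simp [List.getD, List.getElem?_set_ne (by omega : i ≠ j)]
    rw [hne]
    exact hd j (by omega)

theorem fold_inv (s : List Char) :
    ∀ (cnt i₀ : Nat) (d : List Nat), 2 ≤ i₀ → i₀ + cnt ≤ s.length + 1 →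
      d.length = s.length + 1 → (∀ j, j < i₀ → d.getD j 0 = Bspec s j) →
      (((List.range' i₀ cnt).foldl (kmpStep s) d).length = s.length + 1 ∧
       ∀ j, j < i₀ + cnt → ((List.range' i₀ cnt).foldl (kmpStep s) d).getD j 0 = Bspec s j) := by
  intro cnt
  induction cnt with
  | zero =>
    intro i₀ d h2 hle hlen hd
    exact ⟨by simpa using hlen, fun j hj => by simpa using hd j (by omega)⟩
  | succ cnt IH =>
    intro i₀ d h2 hle hlen hd
    rw [List.range'_succ, List.foldl_cons]
    obtain ⟨hl, hv⟩ := step_correct s d i₀ h2 (by omega) hlen hd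
    obtain ⟨h1, h2'⟩ := IH (i₀+1) (kmpStep s d i₀) (by omega) (by omega) hl
      (fun j hj => hv j (by omega))
    exact ⟨h1, fun j hj => h2' j (by omega)⟩

theorem take_drop_brdb (s : List Char) (b : Nat) (hb : b ≤ s.length) :
    (s.take b = s.drop (s.length - b)) ↔
      (∀ t, t < b → s.getD t ' ' = s.getD (s.length - b + t) ' ') := by
  constructor
  · intro h t ht
    have h1 : t < (s.take b).length := by simp; omega
    have h2 : t < (s.drop (s.length - b)).length := by simp; omega
    have := List.getElem_of_eq h (i := t) h1
    rw [List.getElem_take, List.getElem_drop] at this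
    rw [List.getD_eq_getElem s ' ' (by omega), List.getD_eq_getElem s ' ' (by omega)]
    exact this
  · intro hx
    apply List.ext_getElem
    · simp
      omega
    · intro t h1 h2
      simp only [List.length_take, List.length_drop] at h1 h2
      rw [List.getElem_take, List.getElem_drop]
      have := hx t (by omega)
      rwa [List.getD_eq_getElem s ' ' (by omega), List.getD_eq_getElem s ' ' (by omega)] at this

theorem findBorder_eq (s : List Char) :
    ∀ k, k + 1 ≤ s.length →
      findBorder s k = Nat.findGreatest (fun b => brdb s s.length b = true) k := by
  intro k
  induction k with
  | zero => intro _; rfl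
  | succ k IH =>
    intro hk
    rw [Nat.findGreatest_succ, findBorder]
    have hcond : (s.getD k ' ' = s.getD (s.length - 1) ' ' ∧
        s.take (k+1) = s.drop (s.length - (k+1))) ↔ brdb s s.length (k+1) = true := by
      rw [brdb_iff, take_drop_brdb s (k+1) (by omega)]
      constructor
      · rintro ⟨_, hx⟩
        exact ⟨by omega, hx⟩
      · rintro ⟨_, hx⟩
        refine ⟨?_, hx⟩
        have := hx k (by omega)
        rwa [show s.length - (k+1) + k = s.length - 1 by omega] at this
    by_cases hc : brdb s s.length (k+1) = true
    · rw [if_pos hc, if_pos (hcond.mpr hc)]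
    · rw [if_neg hc, if_neg (fun h => hc (hcond.mp h))]
      exact IH (by omega)

theorem border_main (s : List Char) (h : 2 ≤ s.length) :
    (((List.range' 2 (s.length - 1)).foldl (kmpStep s)
        (List.replicate (s.length + 1) 0)).getD s.length 0) = findBorder s (s.length - 1) := by
  have hd0 : ∀ j, j < 2 → (List.replicate (s.length + 1) 0).getD j 0 = Bspec s j := by
    intro j hj
    interval_cases j
    · simp [Bspec, Nat.findGreatest]
    · simp [Bspec, Nat.findGreatest]
  obtain ⟨hl, hv⟩ := fold_inv s (s.length - 1) 2 (List.replicate (s.length + 1) 0)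
    (le_refl 2) (by omega) (by simp) hd0
  have h1 := hv s.length (by omega)
  rw [h1, findBorder_eq s (s.length - 1) (by omega)]
  rfl

-- ===== VERDICT (by name: the statement is the Claim_ definition above) =====
theorem func_spec : Claim_equal_func := by
  intro s1 s2 _
  show func s1 s2 = func_alt s1 s2
  unfold func func_alt
  by_cases hg : s1.toList.length ≠ s2.toList.length ∨ s1.toList.length < 2
  · simp only [if_pos hg]
  · simp only [if_neg hg]
    have hlen : (s1.toList ++ s2.toList).length = 2 * s1.toList.length := by
      simp only [List.length_append]
      omega
    have hb := border_main (s1.toList ++ s2.toList) (by simp only [List.length_append]; omega)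
    rw [hlen] at hb
    rw [hlen, hb]
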